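-- pv_equiv track=rewrite | github.com/gabrielllj/r3-automation-test | aplikasi.py | map_market_to_region
-- ===== SOURCE A (Python) =====
-- def map_market_to_region(market, territories_dict):
--     """This function will maps each market to the right region by looping each element in the dictionaries and return the correct subset matches."""
--     market_countries = set([x.strip() for x in market.split(',')])
--     # Step 1: Check for an exact match in the dictionary
--     for key in territories_dict:
--         key_countries = set([x.strip() for x in key.split(',')])
--         if market_countries == key_countries:
--             return territories_dict[key]
--     # Step 2: If no exact match, check for subset matches
--     for key in territories_dict:
--         key_countries = set([x.strip() for x in key.split(',')])
--         if market_countries.issubset(key_countries):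
--             return territories_dict[key]
--     return None
-- ===== SOURCE B (Python) =====
-- def map_market_to_region(market, territories_dict):
--     """Single pass: return value on first exact match; remember first subset match and return it only after the whole scan."""
--     market_countries = set(x.strip() for x in market.split(','))
--     subset_result = None
--     for key, value in territories_dict.items():
--         key_countries = set(x.strip() for x in key.split(','))
--         if market_countries == key_countries:
--             return value
--         if subset_result is None and market_countries.issubset(key_countries):
--             subset_result = value
--     return subset_result
-- ===== Notes on version B (the rewrite author's own statement) =====
-- stated objective: simpler
-- what changed: Replaces A's two full scans (exact-match pass, then subset pass) by one single scan that returns immediately on an exact match and carries the first subset match in an accumulator returned after the loop.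
import Mathlib
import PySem

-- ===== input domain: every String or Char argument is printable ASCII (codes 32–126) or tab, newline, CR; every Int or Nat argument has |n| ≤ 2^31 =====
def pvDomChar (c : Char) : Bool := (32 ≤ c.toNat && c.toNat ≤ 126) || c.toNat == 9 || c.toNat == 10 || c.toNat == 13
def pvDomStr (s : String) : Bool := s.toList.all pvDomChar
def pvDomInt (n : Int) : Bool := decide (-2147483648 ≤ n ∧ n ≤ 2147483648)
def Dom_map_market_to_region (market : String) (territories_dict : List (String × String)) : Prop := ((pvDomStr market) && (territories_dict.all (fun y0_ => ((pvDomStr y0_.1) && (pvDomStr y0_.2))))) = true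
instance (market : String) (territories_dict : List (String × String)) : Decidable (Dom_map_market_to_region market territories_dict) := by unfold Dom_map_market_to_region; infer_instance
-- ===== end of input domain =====

-- B merges A's two scans into one: return on an exact match, remember the first subset match
-- and return it only after the whole scan (equivalence is about the RETURN value; neither mutates).

-- set(x.strip() for x in s.split(','))
def pvCountrySet (s : String) : PySem.Set String :=
  PySem.Set.ofList ((PySem.Chars.splitOn s.toList [',']).map (fun cs => String.ofList (PySem.Chars.strip cs)))

-- ===== PORT A =====
-- first loop: exact match (dict keys are unique, so territories_dict[key] is the pair's value)
def pvLoopExact (mc : PySem.Set String) : List (String × String) → Option String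
  | [] => none
  | (k, v) :: rest =>
      if PySem.Set.equal mc (pvCountrySet k) then some v else pvLoopExact mc rest

-- second loop: subset match
def pvLoopSubset (mc : PySem.Set String) : List (String × String) → Option String
  | [] => none
  | (k, v) :: rest =>
      if PySem.Set.issubset mc (pvCountrySet k) then some v else pvLoopSubset mc rest

def map_market_to_region (market : String) (territories_dict : List (String × String)) : Option String :=
  let mc := pvCountrySet market
  match pvLoopExact mc territories_dict with
  | some v => some v
  | none =>
      match pvLoopSubset mc territories_dict with
      | some v => some v
      | none => none

-- ===== PORT B =====
-- single scan carrying the first subset match in an accumulator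
def pvScan (mc : PySem.Set String) : List (String × String) → Option String → Option String
  | [], subRes => subRes
  | (k, v) :: rest, subRes =>
      let kc := pvCountrySet k
      if PySem.Set.equal mc kc then some v
      else pvScan mc rest
        (if subRes = none && PySem.Set.issubset mc kc then some v else subRes)

def map_market_to_region_alt (market : String) (territories_dict : List (String × String)) : Option String :=
  pvScan (pvCountrySet market) territories_dict none

-- ===== PRECONDITION & SPEC =====
def Spec_map_market_to_region (market : String) (territories_dict : List (String × String)) (out : Option String) : Prop := out = map_market_to_region_alt market territories_dict
instance (market : String) (territories_dict : List (String × String)) (out : Option String) : Decidable (Spec_map_market_to_region market territories_dict out) := by unfold Spec_map_market_to_region; infer_instance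

-- ===== CLAIM (what is proved, stated in full; the proofs are below) =====
def Claim_equal_map_market_to_region : Prop := ∀ (market : String) (territories_dict : List (String × String)), Dom_map_market_to_region market territories_dict → Spec_map_market_to_region market territories_dict (map_market_to_region market territories_dict)

-- ===== LEMMAS AND PROOFS =====

-- the single scan returns: exact match of the remaining list, else the accumulator, else its subset match
theorem pvScan_eq (mc : PySem.Set String) (l : List (String × String)) (subRes : Option String) :
    pvScan mc l subRes =
      ((pvLoopExact mc l).orElse (fun _ => subRes)).orElse (fun _ => pvLoopSubset mc l) := by
  induction l generalizing subRes with
  | nil => simp [pvScan, pvLoopExact, pvLoopSubset]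
  | cons p rest ih =>
      obtain ⟨k, v⟩ := p
      by_cases he : PySem.Set.equal mc (pvCountrySet k)
      · simp [pvScan, pvLoopExact, he, Option.orElse]
      · by_cases hs : PySem.Set.issubset mc (pvCountrySet k)
        · cases subRes with
          | none =>
              simp only [pvScan, pvLoopExact, pvLoopSubset, he, hs, ih]
              cases pvLoopExact mc rest <;> simp [Option.orElse]
          | some s =>
              simp only [pvScan, pvLoopExact, pvLoopSubset, he, hs, ih]
              cases pvLoopExact mc rest <;> simp [Option.orElse]
        · simp [pvScan, pvLoopExact, pvLoopSubset, he, hs, ih]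

-- ===== VERDICT (by name: the statement is the Claim_ definition above) =====
theorem map_market_to_region_spec : Claim_equal_map_market_to_region := by
  intro market td _
  unfold Spec_map_market_to_region map_market_to_region map_market_to_region_alt
  rw [pvScan_eq]
  cases hE : pvLoopExact (pvCountrySet market) td with
  | some v => simp [hE, Option.orElse]
  | none =>
      cases hS : pvLoopSubset (pvCountrySet market) td with
      | some v => simp [hE, hS, Option.orElse]
      | none => simp [hE, hS, Option.orElse]
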